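-- pv_equiv track=rewrite | github.com/Flying-Fairy/advent-of-code-2023 | python/day14p1.py | fall_rock
-- ===== SOURCE A (Python) =====
-- def fall_rock(pos, grid):
--     x, y = pos
--     if grid[x][y] in "O#":
--         return (x + 1, y)
--     elif x == 0:
--         return pos
--     else:
--         return fall_rock((x - 1, y), grid)
-- ===== SOURCE B (Python) =====
-- def fall_rock(pos, grid):
--     x, y = pos
--     stop = next((i for i in range(x, -1, -1) if grid[i][y] in "O#"), None)
--     return (0, y) if stop is None else (stop + 1, y)
-- ===== Notes on version B (the rewrite author's own statement) =====
-- stated objective: alternative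
-- what changed: A's tail recursion with a three-way branch is replaced by a find-first query: the landing row is the first index in range(x, -1, -1) whose cell is an obstacle (next over a lazy generator), with 0 as the default.
-- outside the precondition, e.g. on fall_rock((-2, 0), ['#', '#']): A returns (-1, 0), B returns (0, 0)
import Mathlib
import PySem

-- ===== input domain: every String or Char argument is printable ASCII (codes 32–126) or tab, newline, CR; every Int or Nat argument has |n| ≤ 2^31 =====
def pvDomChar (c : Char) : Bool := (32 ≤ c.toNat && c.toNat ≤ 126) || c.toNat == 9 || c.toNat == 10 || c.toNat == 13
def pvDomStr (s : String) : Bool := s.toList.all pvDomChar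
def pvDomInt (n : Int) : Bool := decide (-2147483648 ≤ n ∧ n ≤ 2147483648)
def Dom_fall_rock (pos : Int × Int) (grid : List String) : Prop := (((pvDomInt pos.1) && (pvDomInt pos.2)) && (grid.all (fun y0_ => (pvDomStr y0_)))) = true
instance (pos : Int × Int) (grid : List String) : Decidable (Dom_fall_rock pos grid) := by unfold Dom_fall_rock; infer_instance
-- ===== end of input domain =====

-- B replaces A's tail recursion by a find-first query over the countdown range(x, -1, -1)
-- (next over a lazy generator; alternative decomposition, same cost).

-- ===== PORT A =====
-- A's recursion, made total with a fuel bound (under Pre_ the fuel is never exhausted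
-- and the index lookups never miss; the `none`/fuel-out branches are dead code there).
def fallRockGoA (grid : List String) : Nat → (Int × Int) → Int × Int
  | 0, pos => pos
  | fuel + 1, pos =>
    match PySem.List.pyGet? grid pos.1 with
    | none => pos                                   -- IndexError in Python; outside Pre_
    | some row =>
      match PySem.Str.pyGet? row pos.2 with
      | none => pos                                 -- IndexError in Python; outside Pre_
      | some c =>
        if c == 'O' || c == '#' then (pos.1 + 1, pos.2)
        else if pos.1 == 0 then pos
        else fallRockGoA grid fuel (pos.1 - 1, pos.2)

def fall_rock (pos : Int × Int) (grid : List String) : Int × Int :=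
  fallRockGoA grid (pos.1.toNat + grid.length + 1) pos

-- ===== PORT B =====
-- B's next(..., None) over a lazy generator: find the first obstacle index in the
-- countdown range (a failed cell lookup counts as no obstacle; in Python it raises
-- IndexError there, which is outside Pre_ — the tester samples inside Pre_ only).
def fall_rock_alt (pos : Int × Int) (grid : List String) : Int × Int :=
  match (PySem.List.pyRange pos.1 (-1) (-1)).find? (fun i =>
      ((PySem.List.pyGet? grid i).bind (fun row => PySem.Str.pyGet? row pos.2)).any
        (fun c => c == 'O' || c == '#')) with
  | none => (0, pos.2)
  | some i => (i + 1, pos.2)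

-- ===== PRECONDITION & SPEC =====
-- Pre_ excludes the inputs on which A raises IndexError, and with them one returning
-- corner we do not claim: a negative start row on which A survives only by Python's
-- negative-index wraparound (B's empty countdown range yields (0, y) there).
-- Concretely: the start row is a genuine index (0 ≤ x < len(grid)) and the descent
-- succeeds — some row j ≤ x has every cell (i, y) for j ≤ i ≤ x in range, and row j
-- either carries an obstacle or is the top row.
def pvObstacleAt (grid : List String) (j : Nat) (y : Int) : Bool :=
  (PySem.Str.pyGet? (grid.getD j "") y).any (fun c => c == 'O' || c == '#')

def Pre_fall_rock (pos : Int × Int) (grid : List String) : Prop :=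
  0 ≤ pos.1 ∧ pos.1 < (grid.length : Int) ∧
    ∃ j ∈ List.range (pos.1.toNat + 1),
      (∀ i ∈ List.range (pos.1.toNat + 1), j ≤ i →
        PySem.Raise.InRange (grid.getD i "").length pos.2) ∧
      (pvObstacleAt grid j pos.2 = true ∨ j = 0)
instance (pos : Int × Int) (grid : List String) : Decidable (Pre_fall_rock pos grid) := by
  unfold Pre_fall_rock; infer_instance

def pvWitness_fall_rock : (Int × Int) × List String := ((1, 0), ["..", ".."])

def Spec_fall_rock (pos : Int × Int) (grid : List String) (out : Int × Int) : Prop := out = fall_rock_alt pos grid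
instance (pos : Int × Int) (grid : List String) (out : Int × Int) : Decidable (Spec_fall_rock pos grid out) := by unfold Spec_fall_rock; infer_instance

-- ===== CLAIM =====
def Claim_equal_fall_rock : Prop := ∀ (pos : Int × Int) (grid : List String), Dom_fall_rock pos grid → Pre_fall_rock pos grid → Spec_fall_rock pos grid (fall_rock pos grid)

-- ===== LEMMAS AND PROOFS =====

-- The cell read both ports perform is defined when row and column indices are in range.
theorem strGet_some_of_inRange (s : String) (y : Int)
    (h : PySem.Raise.InRange s.length y) : ∃ c, PySem.Str.pyGet? s y = some c := by
  rcases hg : PySem.Str.pyGet? s y with _ | c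
  · exfalso
    simp only [PySem.Str.pyGet?, PySem.Chars.pyGet?_eq_listPyGet?] at hg
    exact (PySem.List.pyGet?_eq_none_iff _ _).mp hg (by simpa using h)
  · exact ⟨c, rfl⟩

theorem gridGet_row (grid : List String) (k : Nat) (hk : k < grid.length) :
    PySem.List.pyGet? grid ((k : Nat) : Int) = some (grid.getD k "") := by
  rw [PySem.List.pyGet?_of_nonneg _ (by positivity)]
  simp [List.getElem?_eq_getElem hk, List.getD]

-- evaluating B's obstacle predicate when the cell lookup succeeds
theorem fallRockPredB_eval (grid : List String) (y k : Int) (row : String) (c : Char)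
    (hrow : PySem.List.pyGet? grid k = some row) (hc : PySem.Str.pyGet? row y = some c) :
    ((PySem.List.pyGet? grid k).bind (fun row => PySem.Str.pyGet? row y)).any
      (fun c => c == 'O' || c == '#') = (c == 'O' || c == '#') := by
  rw [hrow]
  rw [show (some row).bind (fun row => PySem.Str.pyGet? row y) = PySem.Str.pyGet? row y from rfl]
  rw [hc, Option.any_some]

-- evaluating one unfolding of A's recursion when the cell lookup succeeds
theorem fallRockGoA_eval (grid : List String) (y : Int) (fuel : Nat) (k : Int)
    (row : String) (c : Char)
    (hrow : PySem.List.pyGet? grid k = some row) (hc : PySem.Str.pyGet? row y = some c) :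
    fallRockGoA grid (fuel + 1) (k, y) =
      if (c == 'O' || c == '#') = true then (k + 1, y)
      else if (k == 0) = true then (k, y) else fallRockGoA grid fuel (k - 1, y) := by
  simp only [fallRockGoA, hrow, hc]

-- Under valid indexing, A's descent from row n equals B's find-first over the countdown range.
theorem fallRockGoA_eq_find (grid : List String) (y : Int) (n fuel : Nat)
    (hfuel : n < fuel) (hn : (n : Int) < (grid.length : Int))
    (hcells : ∃ j ∈ List.range (n + 1),
      (∀ i ∈ List.range (n + 1), j ≤ i →
        PySem.Raise.InRange (grid.getD i "").length y) ∧
      (pvObstacleAt grid j y = true ∨ j = 0)) :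
    fallRockGoA grid fuel ((n : Int), y) =
      (match (PySem.List.pyRange ((n : Int)) (-1) (-1)).find? (fun i =>
          ((PySem.List.pyGet? grid i).bind (fun row => PySem.Str.pyGet? row y)).any
            (fun c => c == 'O' || c == '#')) with
        | none => (0, y)
        | some i => (i + 1, y)) := by
  induction n generalizing fuel with
  | zero =>
    obtain ⟨f, rfl⟩ : ∃ f, fuel = f + 1 := ⟨fuel - 1, by omega⟩
    have hrow : PySem.List.pyGet? grid ((0 : Nat) : Int) = some (grid.getD 0 "") :=
      gridGet_row grid 0 (by exact_mod_cast hn)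
    obtain ⟨j, hjmem, hval, -⟩ := hcells
    have hj0 : j = 0 := by simpa using hjmem
    obtain ⟨c, hc⟩ := strGet_some_of_inRange (grid.getD 0 "") y
      (hval 0 (by simp) (by omega))
    have hpred := fallRockPredB_eval grid y ((0 : Nat) : Int) _ c hrow hc
    rw [Nat.cast_zero] at hrow hpred ⊢
    rw [fallRockGoA_eval grid y f 0 _ c hrow hc,
      PySem.List.pyRange_neg_one_cons (by omega),
      PySem.List.pyRange_neg_one_eq_nil (by omega)]
    by_cases hob : (c == 'O' || c == '#') = true
    · rw [List.find?_cons_of_pos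
        (p := fun i => ((PySem.List.pyGet? grid i).bind (fun row => PySem.Str.pyGet? row y)).any
          (fun c => c == 'O' || c == '#')) (hpred.trans hob)]
      simp [hob]
    · rw [List.find?_cons_of_neg
        (p := fun i => ((PySem.List.pyGet? grid i).bind (fun row => PySem.Str.pyGet? row y)).any
          (fun c => c == 'O' || c == '#')) (fun h => hob (hpred.symm.trans h)),
        List.find?_nil]
      simp [hob]
  | succ m ih =>
    obtain ⟨f, rfl⟩ : ∃ f, fuel = f + 1 := ⟨fuel - 1, by omega⟩
    have hrow : PySem.List.pyGet? grid (((m + 1 : Nat)) : Int) = some (grid.getD (m + 1) "") :=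
      gridGet_row grid (m + 1) (by exact_mod_cast hn)
    obtain ⟨j, hjmem, hval, hstop⟩ := hcells
    have hjle : j ≤ m + 1 := by simpa [Nat.lt_succ_iff] using hjmem
    obtain ⟨c, hc⟩ :=
      strGet_some_of_inRange (grid.getD (m + 1) "") y (hval (m + 1) (by simp) hjle)
    have hpred := fallRockPredB_eval grid y ((m + 1 : Nat) : Int) _ c hrow hc
    rw [fallRockGoA_eval grid y f _ _ c hrow hc,
      PySem.List.pyRange_neg_one_cons (by push_cast; omega)]
    by_cases hob : (c == 'O' || c == '#') = true
    · rw [List.find?_cons_of_pos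
        (p := fun i => ((PySem.List.pyGet? grid i).bind (fun row => PySem.Str.pyGet? row y)).any
          (fun c => c == 'O' || c == '#')) (hpred.trans hob)]
      simp [hob]
    · rw [List.find?_cons_of_neg
        (p := fun i => ((PySem.List.pyGet? grid i).bind (fun row => PySem.Str.pyGet? row y)).any
          (fun c => c == 'O' || c == '#')) (fun h => hob (hpred.symm.trans h)),
        if_neg hob,
        show ((m + 1 : Nat) : Int) - 1 = ((m : Nat) : Int) by push_cast; ring,
        if_neg (by simp; omega)]
      have hjm : j ≤ m := by
        rcases Nat.lt_or_ge j (m + 1) with h | h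
        · omega
        · exfalso
          have hj : j = m + 1 := by omega
          rcases hstop with hobj | hz
          · rw [hj] at hobj
            unfold pvObstacleAt at hobj
            rw [hc, Option.any_some] at hobj
            exact hob hobj
          · omega
      exact ih f (by omega) (by push_cast at hn ⊢; omega)
        ⟨j, by simp [hjm], fun i hi hji =>
          hval i (by simp at hi ⊢; omega) hji, hstop⟩

-- ===== VERDICT =====
theorem fall_rock_spec : Claim_equal_fall_rock := by
  intro pos grid _ hpre
  obtain ⟨hx0, hxlt, hcells⟩ := hpre
  obtain ⟨n, hn⟩ : ∃ n : Nat, pos.1 = (n : Int) := ⟨pos.1.toNat, by omega⟩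
  unfold Spec_fall_rock fall_rock fall_rock_alt
  obtain ⟨x, y⟩ := pos
  simp only at hn hx0 hxlt hcells ⊢
  subst hn
  simp only [Int.toNat_natCast] at hcells ⊢
  exact fallRockGoA_eq_find grid y n (n + grid.length + 1) (by omega)
    (by exact_mod_cast hxlt) hcells
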